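-- pv_equiv track=rewrite | github.com/jellyfishing2346/TIP-class-assignments | Week-03/class-exercises/advanced-version-1/arrange_guest_arrivial_order.py | arrange_guest_arrival_order
-- ===== SOURCE A (Python) =====
-- def arrange_guest_arrival_order(arrival_pattern):
--     n = len(arrival_pattern)
--     result = []
--     stack = []
--
--     for i in range(n + 1):
--         stack.append(str(i + 1))
--
--         # If we're at the end or the current pattern is 'I', pop from stack
--         if i == n or arrival_pattern[i] == 'I':
--             while stack:
--                 result.append(stack.pop())
--
--     return ''.join(result)
-- ===== SOURCE B (Python) =====
-- def arrange_guest_arrival_order(arrival_pattern):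
--     # Two passes, no stack: first compute the run lengths between 'I's,
--     # then emit each block as a descending numeric range.
--     runs = []
--     count = 0
--     for c in arrival_pattern:
--         count += 1
--         if c == 'I':
--             runs.append(count)
--             count = 0
--     runs.append(count + 1)
--     out = []
--     start = 0
--     for r in runs:
--         out.extend(str(v) for v in range(start + r, start, -1))
--         start += r
--     return ''.join(out)
-- ===== Notes on version B (the rewrite author's own statement) =====
-- stated objective: alternative
-- what changed: Replaced the push/flush stack with a two-pass scheme: one pass computes the run lengths between increase markers, a second emits each block as a descending numeric range; no stack is kept.
import Mathlib
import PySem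

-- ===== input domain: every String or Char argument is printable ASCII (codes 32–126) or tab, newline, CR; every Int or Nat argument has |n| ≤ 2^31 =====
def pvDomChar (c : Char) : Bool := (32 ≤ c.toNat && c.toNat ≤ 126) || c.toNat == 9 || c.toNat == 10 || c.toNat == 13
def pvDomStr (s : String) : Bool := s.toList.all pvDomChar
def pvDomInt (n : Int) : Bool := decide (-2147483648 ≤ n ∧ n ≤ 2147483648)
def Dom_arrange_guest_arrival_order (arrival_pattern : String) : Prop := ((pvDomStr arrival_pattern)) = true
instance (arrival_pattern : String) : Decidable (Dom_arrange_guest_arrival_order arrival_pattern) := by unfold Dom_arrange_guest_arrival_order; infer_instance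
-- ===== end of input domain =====

-- B replaces A's push/flush stack by two passes (run lengths between 'I's, then descending-range emission); alternative algorithm, same cost.


-- ===== PORT A =====
-- one step of A's for-loop: push str(i+1); at the end or on 'I', pop the whole stack into result
def pvStepA (p : List Char) (n : Int) (acc : List String × List String) (i : Int) :
    List String × List String :=
  let stack := acc.2 ++ [PySem.Int.toStr (i + 1)]
  if i = n ∨ p[i.toNat]? = some 'I' then (acc.1 ++ stack.reverse, []) else (acc.1, stack)

def arrange_guest_arrival_order (arrival_pattern : String) : String :=
  let p := arrival_pattern.toList
  let n : Int := p.length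
  let fin := (PySem.List.pyRange 0 (n + 1) 1).foldl (pvStepA p n) ([], [])
  PySem.Str.join "" fin.1

-- ===== PORT B =====
-- pass 1: run lengths between 'I's
def pvStep1 (acc : List Int × Int) (c : Char) : List Int × Int :=
  let count := acc.2 + 1
  if c = 'I' then (acc.1 ++ [count], 0) else (acc.1, count)

-- pass 2: emit each run as a descending range of numerals
def pvStep2 (acc : List String × Int) (r : Int) : List String × Int :=
  (acc.1 ++ (PySem.List.pyRange (acc.2 + r) acc.2 (-1)).map PySem.Int.toStr, acc.2 + r)

def arrange_guest_arrival_order_alt (arrival_pattern : String) : String :=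
  let f1 := arrival_pattern.toList.foldl pvStep1 ([], 0)
  let runs := f1.1 ++ [f1.2 + 1]
  let f2 := runs.foldl pvStep2 ([], 0)
  PySem.Str.join "" f2.1

-- ===== PRECONDITION & SPEC =====
def Spec_arrange_guest_arrival_order (arrival_pattern : String) (out : String) : Prop := out = arrange_guest_arrival_order_alt arrival_pattern
instance (arrival_pattern : String) (out : String) : Decidable (Spec_arrange_guest_arrival_order arrival_pattern out) := by unfold Spec_arrange_guest_arrival_order; infer_instance

-- ===== CLAIM (what is proved, stated in full; the proofs are below) =====
def Claim_equal_arrange_guest_arrival_order : Prop := ∀ (arrival_pattern : String), Dom_arrange_guest_arrival_order arrival_pattern → Spec_arrange_guest_arrival_order arrival_pattern (arrange_guest_arrival_order arrival_pattern)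

-- ===== LEMMAS AND PROOFS =====

-- common reference: the output blocks, as A produces them (stack = pending ascending block)
def pvSpec : List Char → Int → List String → List String
  | [], k, stack => (stack ++ [PySem.Int.toStr (k + 1)]).reverse
  | c :: cs, k, stack =>
      let st := stack ++ [PySem.Int.toStr (k + 1)]
      if c = 'I' then st.reverse ++ pvSpec cs (k + 1) [] else pvSpec cs (k + 1) st

-- B pass-1 components
def pvRunsOf : List Char → Int → List Int
  | [], _ => []
  | c :: cs, cnt => if c = 'I' then (cnt + 1) :: pvRunsOf cs 0 else pvRunsOf cs (cnt + 1)

def pvLastCnt : List Char → Int → Int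
  | [], cnt => cnt
  | c :: cs, cnt => if c = 'I' then pvLastCnt cs 0 else pvLastCnt cs (cnt + 1)

-- B pass-2 reference
def pvEmit : List Int → Int → List String
  | [], _ => []
  | r :: rs, start => (PySem.List.pyRange (start + r) start (-1)).map PySem.Int.toStr ++ pvEmit rs (start + r)

lemma pvAloop (p : List Char) :
    ∀ (cs : List Char) (m : Nat) (res stack : List String),
      p.drop m = cs → m ≤ p.length →
      ((PySem.List.pyRange (m : Int) ((p.length : Int) + 1) 1).foldl (pvStepA p (p.length : Int)) (res, stack)).1
        = res ++ pvSpec cs (m : Int) stack := by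
  intro cs
  induction cs with
  | nil =>
      intro m res stack hdrop hle
      have hm : m = p.length := by
        have := List.drop_eq_nil_iff.mp hdrop
        omega
      subst hm
      rw [PySem.List.pyRange_one_cons (by exact_mod_cast lt_add_one _)]
      rw [PySem.List.pyRange_one_eq_nil (by omega)]
      simp [pvStepA, pvSpec]
  | cons c cs ih =>
      intro m res stack hdrop hle
      have hmlt : m < p.length := by
        by_contra h
        rw [List.drop_eq_nil_iff.mpr (by omega)] at hdrop
        exact List.cons_ne_nil _ _ hdrop.symm
      have hget : p[m]? = some c := by
        have h0 : (p.drop m)[0]? = some c := by rw [hdrop]; rfl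
        rw [List.getElem?_drop] at h0
        simpa using h0
      rw [PySem.List.pyRange_one_cons (by exact_mod_cast (by omega : m < p.length + 1))]
      rw [List.foldl_cons]
      have hcast : ((m : Int) + 1) = ((m + 1 : Nat) : Int) := by push_cast; ring
      by_cases hc : c = 'I'
      · have : pvStepA p (p.length : Int) (res, stack) (m : Int)
            = (res ++ (stack ++ [PySem.Int.toStr ((m : Int) + 1)]).reverse, []) := by
          simp only [pvStepA]
          rw [if_pos]
          right
          simpa [hc] using hget
        rw [this, hcast,
            ih (m + 1) _ [] (by rw [← List.drop_drop]; rw [hdrop]; rfl) (by omega)]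
        simp [pvSpec, hc, ← hcast, List.append_assoc]
      · have : pvStepA p (p.length : Int) (res, stack) (m : Int)
            = (res, stack ++ [PySem.Int.toStr ((m : Int) + 1)]) := by
          simp only [pvStepA]
          rw [if_neg]
          rintro (h | h)
          · omega
          · simp only [Int.toNat_natCast] at h
            rw [hget] at h; exact hc (by simpa using h)
        rw [this, hcast,
            ih (m + 1) _ _ (by rw [← List.drop_drop]; rw [hdrop]; rfl) (by omega)]
        simp [pvSpec, hc, ← hcast]

lemma pvBfold1 :
    ∀ (cs : List Char) (racc : List Int) (cnt : Int),
      cs.foldl pvStep1 (racc, cnt) = (racc ++ pvRunsOf cs cnt, pvLastCnt cs cnt) := by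
  intro cs
  induction cs with
  | nil => intro racc cnt; simp [pvRunsOf, pvLastCnt]
  | cons c cs ih =>
      intro racc cnt
      by_cases hc : c = 'I' <;>
        simp [pvStep1, pvRunsOf, pvLastCnt, hc, ih, List.append_assoc]

lemma pvBfold2 :
    ∀ (rs : List Int) (out : List String) (start : Int),
      (rs.foldl pvStep2 (out, start)).1 = out ++ pvEmit rs start := by
  intro rs
  induction rs with
  | nil => intro out start; simp [pvEmit]
  | cons r rs ih =>
      intro out start
      simp [pvStep2, pvEmit, ih, List.append_assoc]

lemma pvKey :
    ∀ (cs : List Char) (start : Int) (cnt : Nat),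
      pvEmit (pvRunsOf cs (cnt : Int) ++ [pvLastCnt cs (cnt : Int) + 1]) start
        = pvSpec cs (start + (cnt : Int))
            (((PySem.List.pyRange (start + (cnt : Int)) start (-1)).map PySem.Int.toStr).reverse) := by
  intro cs
  induction cs with
  | nil =>
      intro start cnt
      rw [pvRunsOf, pvLastCnt]
      simp only [List.nil_append, pvEmit, pvSpec, List.append_nil]
      rw [show start + ((cnt : Int) + 1) = start + (cnt : Int) + 1 by ring,
          PySem.List.pyRange_neg_one_cons (by omega)]
      simp
  | cons c cs ih =>
      intro start cnt
      by_cases hc : c = 'I'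
      · rw [pvRunsOf, pvLastCnt]
        simp only [hc, reduceIte, List.cons_append, pvEmit]
        have h0 := ih (start + (cnt : Int) + 1) 0
        simp only [Nat.cast_zero, add_zero,
          PySem.List.pyRange_neg_one_eq_nil (le_refl (start + (cnt : Int) + 1)),
          List.map_nil, List.reverse_nil] at h0
        rw [show start + ((cnt : Int) + 1) = start + (cnt : Int) + 1 by ring, h0]
        simp only [pvSpec, reduceIte]
        rw [PySem.List.pyRange_neg_one_cons (show start < start + (cnt : Int) + 1 by omega)]
        simp
      · rw [pvRunsOf, pvLastCnt]
        simp only [hc, reduceIte]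
        have hcast : (cnt : Int) + 1 = ((cnt + 1 : Nat) : Int) := by push_cast; ring
        rw [hcast, ih start (cnt + 1)]
        simp only [pvSpec, hc, reduceIte]
        rw [show start + ((cnt + 1 : Nat) : Int) = start + (cnt : Int) + 1 by push_cast; ring]
        rw [PySem.List.pyRange_neg_one_cons (show start < start + (cnt : Int) + 1 by omega)]
        simp

theorem pv_main (p : List Char) :
    ((PySem.List.pyRange 0 ((p.length : Int) + 1) 1).foldl (pvStepA p (p.length : Int)) ([], [])).1
      = (((p.foldl pvStep1 ([], 0)).1 ++ [(p.foldl pvStep1 ([], 0)).2 + 1]).foldl pvStep2 ([], 0)).1 := by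
  have hA := pvAloop p p 0 [] [] (by simp) (by omega)
  simp only [Nat.cast_zero] at hA
  rw [hA, pvBfold1, pvBfold2]
  have hK := pvKey p 0 0
  simp only [Nat.cast_zero, add_zero, PySem.List.pyRange_neg_one_eq_nil (le_refl (0 : Int)),
    List.map_nil, List.reverse_nil] at hK
  simp [hK]

-- ===== VERDICT (by name: the statement is the Claim_ definition above) =====
theorem arrange_guest_arrival_order_spec : Claim_equal_arrange_guest_arrival_order := by
  intro ap _
  unfold Spec_arrange_guest_arrival_order arrange_guest_arrival_order arrange_guest_arrival_order_alt
  exact congrArg (PySem.Str.join "") (pv_main ap.toList)
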